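-- pv_equiv track=rewrite | github.com/derlaft/netviz | tr2/test.py | crossProd
-- ===== SOURCE A (Python) =====
-- def crossProd(a,b):
--   dimension = len(a)
--   c = []
--   for i in range(dimension):
--     c.append(0)
--     for j in range(dimension):
--       if j != i:
--         for k in range(dimension):
--           if k != i:
--             if k > j:
--               c[i] += a[j]*b[k]
--             elif k < j:
--               c[i] -= a[j]*b[k]
--   return c
-- ===== SOURCE B (Python) =====
-- def crossProd(a, b):
--     n = len(a)
--     sa = sum(a)
--     sb = sum(b[i] for i in range(n))
--     total = 0
--     pa = 0
--     pb = 0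
--     for i in range(n):
--         total += pa * b[i] - pb * a[i]
--         pa += a[i]
--         pb += b[i]
--     c = []
--     pa = 0
--     pb = 0
--     for i in range(n):
--         ai = a[i]
--         bi = b[i]
--         term = ai * (sb - pb - bi) - bi * (sa - pa - ai) + bi * pa - ai * pb
--         c.append(total - term)
--         pa += ai
--         pb += bi
--     return c
-- ===== Notes on version B (the rewrite author's own statement) =====
-- stated objective: faster
-- what changed: Replaced the O(n^3) triple loop by an O(n) pass (total antisymmetric pair sum via running prefix sums, minus each index's row/column contribution); Pre_ excludes len(b) < len(a), where A raises IndexError for len(a) >= 3 and, for len(a) <= 2, returns all zeros only because its loop guards never touch b while B's indexing of b raises.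
-- outside the precondition, e.g. on crossProd([1, -1], [9]): A returns [0, 0], B raises IndexError
import Mathlib
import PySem

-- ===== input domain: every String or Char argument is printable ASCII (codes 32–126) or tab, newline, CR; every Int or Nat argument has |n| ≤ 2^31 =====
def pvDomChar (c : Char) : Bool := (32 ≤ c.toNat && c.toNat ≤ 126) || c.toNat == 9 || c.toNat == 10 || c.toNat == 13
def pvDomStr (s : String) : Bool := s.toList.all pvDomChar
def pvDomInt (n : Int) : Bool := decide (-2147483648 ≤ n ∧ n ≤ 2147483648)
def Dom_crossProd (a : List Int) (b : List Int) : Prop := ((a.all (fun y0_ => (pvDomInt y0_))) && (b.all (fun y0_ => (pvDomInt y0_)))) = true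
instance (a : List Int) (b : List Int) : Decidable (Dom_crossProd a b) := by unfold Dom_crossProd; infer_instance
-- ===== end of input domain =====

-- B replaces A's O(n^3) triple loop by an O(n) prefix-sum pass (same return value on Pre_).

-- ===== PORT A =====
-- literal port of A's triple loop: c.append(0) then in-place += / -= on c[i]
-- is rendered as one element computed per i (each c[i] only depends on i).
def crossProd (a : List Int) (b : List Int) : List Int :=
  let dimension := a.length
  (List.range dimension).map (fun i =>
    (List.range dimension).foldl (fun ci j =>
      if j ≠ i then
        (List.range dimension).foldl (fun ci k =>
          if k ≠ i then
            if k > j then ci + a.getD j 0 * b.getD k 0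
            else if k < j then ci - a.getD j 0 * b.getD k 0
            else ci
          else ci) ci
      else ci) 0)

-- ===== PORT B =====
def crossProd_alt (a : List Int) (b : List Int) : List Int :=
  let n := a.length
  let sa := a.sum
  let sb := ((List.range n).map (fun i => b.getD i 0)).sum
  let t := (List.range n).foldl (fun (st : Int × Int × Int) i =>
      (st.1 + st.2.1 * b.getD i 0 - st.2.2 * a.getD i 0,
       st.2.1 + a.getD i 0, st.2.2 + b.getD i 0)) (0, 0, 0)
  let total := t.1
  let r := (List.range n).foldl (fun (st : List Int × Int × Int) i =>
      (st.1 ++ [total - (a.getD i 0 * (sb - st.2.2 - b.getD i 0)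
                          - b.getD i 0 * (sa - st.2.1 - a.getD i 0)
                          + b.getD i 0 * st.2.1 - a.getD i 0 * st.2.2)],
       st.2.1 + a.getD i 0, st.2.2 + b.getD i 0)) ([], 0, 0)
  r.1

-- ===== PRECONDITION & SPEC =====
-- Pre_ excludes len(b) < len(a): there A raises IndexError when len(a) >= 3, and when len(a) <= 2 it
-- returns all zeros only because its loop guards never reach b, while B's indexing of b raises IndexError.
def Pre_crossProd (a : List Int) (b : List Int) : Prop := a.length ≤ b.length
instance (a : List Int) (b : List Int) : Decidable (Pre_crossProd a b) := by unfold Pre_crossProd; infer_instance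
def pvWitness_crossProd : List Int × List Int := ([1, 2, 3], [4, 5, 6])
def Spec_crossProd (a : List Int) (b : List Int) (out : List Int) : Prop := out = crossProd_alt a b
instance (a : List Int) (b : List Int) (out : List Int) : Decidable (Spec_crossProd a b out) := by unfold Spec_crossProd; infer_instance

-- ===== CLAIM (what is proved, stated in full; the proofs are below) =====
def Claim_equal_crossProd : Prop := ∀ (a : List Int) (b : List Int), Dom_crossProd a b → Pre_crossProd a b → Spec_crossProd a b (crossProd a b)

-- ===== LEMMAS AND PROOFS =====

-- prefix sum of getD values
def prefL (l : List Int) (i : Nat) : Int := ∑ j ∈ Finset.range i, l.getD j 0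

-- the signed summand of A's inner loops
def sgn2 (a b : List Int) (j k : Nat) : Int :=
  if k > j then a.getD j 0 * b.getD k 0
  else if k < j then -(a.getD j 0 * b.getD k 0) else 0

-- total antisymmetric pair sum
def TT (a b : List Int) (n : Nat) : Int := ∑ j ∈ Finset.range n, ∑ k ∈ Finset.range n, sgn2 a b j k

def totB (a b : List Int) (n : Nat) : Int :=
  ∑ i ∈ Finset.range n, (prefL a i * b.getD i 0 - prefL b i * a.getD i 0)

lemma foldl_range_add (g : Nat → Int) (n : Nat) (acc : Int) :
    (List.range n).foldl (fun acc k => acc + g k) acc = acc + ∑ k ∈ Finset.range n, g k := by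
  induction n with
  | zero => simp
  | succ m ih =>
      rw [List.range_succ, List.foldl_append, ih, Finset.sum_range_succ]
      simp; ring

lemma list_sum_eq_prefL (l : List Int) : l.sum = prefL l l.length := by
  induction l with
  | nil => simp [prefL]
  | cons x xs ih =>
      rw [List.sum_cons, ih, prefL, prefL, List.length_cons, Finset.sum_range_succ']
      simp
      ring

lemma map_range_sum (f : Nat → Int) (n : Nat) :
    ((List.range n).map f).sum = ∑ k ∈ Finset.range n, f k := by
  induction n with
  | zero => simp
  | succ m ih => rw [List.range_succ, Finset.sum_range_succ]; simp [ih]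

lemma A_inner (a b : List Int) (i j n : Nat) (acc : Int) :
    (List.range n).foldl (fun ci k =>
        if k ≠ i then
          if k > j then ci + a.getD j 0 * b.getD k 0
          else if k < j then ci - a.getD j 0 * b.getD k 0
          else ci
        else ci) acc
      = acc + ∑ k ∈ Finset.range n, (if k ≠ i then sgn2 a b j k else 0) := by
  have h : (fun (ci : Int) k =>
        if k ≠ i then
          if k > j then ci + a.getD j 0 * b.getD k 0
          else if k < j then ci - a.getD j 0 * b.getD k 0
          else ci
        else ci)
      = fun ci k => ci + (if k ≠ i then sgn2 a b j k else 0) := by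
    funext ci k
    simp only [sgn2]
    split_ifs <;> ring
  rw [h, foldl_range_add]

lemma A_elem (a b : List Int) (i n : Nat) :
    (List.range n).foldl (fun ci j =>
      if j ≠ i then
        (List.range n).foldl (fun ci k =>
          if k ≠ i then
            if k > j then ci + a.getD j 0 * b.getD k 0
            else if k < j then ci - a.getD j 0 * b.getD k 0
            else ci
          else ci) ci
      else ci) 0
    = ∑ j ∈ Finset.range n, ∑ k ∈ Finset.range n, (if j ≠ i ∧ k ≠ i then sgn2 a b j k else 0) := by
  have h : (fun (ci : Int) j =>
      if j ≠ i then
        (List.range n).foldl (fun ci k =>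
          if k ≠ i then
            if k > j then ci + a.getD j 0 * b.getD k 0
            else if k < j then ci - a.getD j 0 * b.getD k 0
            else ci
          else ci) ci
      else ci)
      = fun ci j => ci + (if j ≠ i then ∑ k ∈ Finset.range n, (if k ≠ i then sgn2 a b j k else 0) else 0) := by
    funext ci j
    by_cases hj : j = i
    · simp [hj]
    · simp only [hj, ne_eq, not_false_iff, if_true, A_inner]
  rw [h, foldl_range_add, zero_add]
  refine Finset.sum_congr rfl fun j _ => ?_
  by_cases hj : j = i
  · simp [hj]
  · simp [hj]

lemma B_fold1 (a b : List Int) (n : Nat) :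
    (List.range n).foldl (fun (st : Int × Int × Int) i =>
      (st.1 + st.2.1 * b.getD i 0 - st.2.2 * a.getD i 0,
       st.2.1 + a.getD i 0, st.2.2 + b.getD i 0)) (0, 0, 0)
    = (totB a b n, prefL a n, prefL b n) := by
  induction n with
  | zero => simp [totB, prefL]
  | succ m ih =>
      rw [List.range_succ, List.foldl_append, ih]
      simp only [List.foldl_cons, List.foldl_nil, totB, prefL, Finset.sum_range_succ,
        Prod.mk.injEq]
      refine ⟨by ring, ?_⟩
      simp

lemma B_fold2 (a b : List Int) (sa sb total : Int) (n : Nat) :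
    (List.range n).foldl (fun (st : List Int × Int × Int) i =>
      (st.1 ++ [total - (a.getD i 0 * (sb - st.2.2 - b.getD i 0)
                          - b.getD i 0 * (sa - st.2.1 - a.getD i 0)
                          + b.getD i 0 * st.2.1 - a.getD i 0 * st.2.2)],
       st.2.1 + a.getD i 0, st.2.2 + b.getD i 0)) ([], 0, 0)
    = ((List.range n).map (fun i => total - (a.getD i 0 * (sb - prefL b i - b.getD i 0)
                          - b.getD i 0 * (sa - prefL a i - a.getD i 0)
                          + b.getD i 0 * prefL a i - a.getD i 0 * prefL b i)),
       prefL a n, prefL b n) := by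
  induction n with
  | zero => simp [prefL]
  | succ m ih =>
      rw [List.range_succ, List.foldl_append, ih, List.map_append]
      simp [prefL, Finset.sum_range_succ]

lemma TT_eq_totB (a b : List Int) (n : Nat) : TT a b n = totB a b n := by
  induction n with
  | zero => simp [TT, totB]
  | succ m ih =>
      have hrow : ∑ k ∈ Finset.range m, sgn2 a b m k = -(a.getD m 0 * prefL b m) := by
        have : ∀ k ∈ Finset.range m, sgn2 a b m k = -(a.getD m 0 * b.getD k 0) := by
          intro k hk
          have hk' := Finset.mem_range.mp hk
          simp [sgn2, Nat.not_lt.mpr (Nat.le_of_lt hk'), hk']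
        rw [Finset.sum_congr rfl this, Finset.sum_neg_distrib, prefL, Finset.mul_sum]
      have hcol : ∑ j ∈ Finset.range m, sgn2 a b j m = prefL a m * b.getD m 0 := by
        have : ∀ j ∈ Finset.range m, sgn2 a b j m = a.getD j 0 * b.getD m 0 := by
          intro j hj
          simp [sgn2, Finset.mem_range.mp hj]
        rw [Finset.sum_congr rfl this, prefL, Finset.sum_mul]
      have hd : sgn2 a b m m = 0 := by simp [sgn2]
      simp only [TT, totB, Finset.sum_range_succ] at *
      rw [Finset.sum_add_distrib] at *
      rw [hrow, hcol, hd, ih]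
      ring

lemma row_eq (a b : List Int) (i n : Nat) (hi : i < n) :
    ∑ k ∈ Finset.range n, sgn2 a b i k
      = a.getD i 0 * (prefL b n - 2 * prefL b i - b.getD i 0) := by
  have hpt : ∀ k ∈ Finset.range n, sgn2 a b i k
      = a.getD i 0 * (b.getD k 0 - (if k < i + 1 then 2 * b.getD k 0 else 0)
          + (if k = i then b.getD k 0 else 0)) := by
    intro k _
    simp only [sgn2]
    split_ifs
    all_goals try (exfalso; omega)
    all_goals ring
  have hsubset : Finset.range (i + 1) ⊆ Finset.range n := by
    intro x hx
    rw [Finset.mem_range] at *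
    omega
  have hsub : ∑ k ∈ Finset.range n, (if k < i + 1 then 2 * b.getD k 0 else 0)
      = 2 * ∑ k ∈ Finset.range (i + 1), b.getD k 0 := by
    rw [← Finset.sum_subset hsubset (fun x _ hx => by
      simp only [Finset.mem_range] at hx
      simp [hx])]
    rw [Finset.mul_sum]
    refine Finset.sum_congr rfl fun k hk => ?_
    simp [Finset.mem_range.mp hk]
  rw [Finset.sum_congr rfl hpt, ← Finset.mul_sum]
  congr 1
  rw [Finset.sum_add_distrib, Finset.sum_sub_distrib, Finset.sum_ite_eq' (Finset.range n) i, hsub,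
    if_pos (Finset.mem_range.mpr hi)]
  simp only [prefL, Finset.sum_range_succ]
  ring

lemma col_eq (a b : List Int) (i n : Nat) (hi : i < n) :
    ∑ j ∈ Finset.range n, sgn2 a b j i
      = b.getD i 0 * (2 * prefL a i + a.getD i 0 - prefL a n) := by
  have hpt : ∀ j ∈ Finset.range n, sgn2 a b j i
      = (-(a.getD j 0) + (if j < i + 1 then 2 * a.getD j 0 else 0)
          - (if j = i then a.getD j 0 else 0)) * b.getD i 0 := by
    intro j _
    simp only [sgn2]
    split_ifs
    all_goals try (exfalso; omega)
    all_goals ring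
  have hsubset : Finset.range (i + 1) ⊆ Finset.range n := by
    intro x hx
    rw [Finset.mem_range] at *
    omega
  have hsub : ∑ j ∈ Finset.range n, (if j < i + 1 then 2 * a.getD j 0 else 0)
      = 2 * ∑ j ∈ Finset.range (i + 1), a.getD j 0 := by
    rw [← Finset.sum_subset hsubset (fun x _ hx => by
      simp only [Finset.mem_range] at hx
      simp [hx])]
    rw [Finset.mul_sum]
    refine Finset.sum_congr rfl fun k hk => ?_
    simp [Finset.mem_range.mp hk]
  rw [Finset.sum_congr rfl hpt, ← Finset.sum_mul, mul_comm]
  congr 1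
  rw [Finset.sum_sub_distrib, Finset.sum_add_distrib, Finset.sum_ite_eq' (Finset.range n) i, hsub,
    if_pos (Finset.mem_range.mpr hi), Finset.sum_neg_distrib]
  simp only [prefL, Finset.sum_range_succ]
  ring

lemma excl_eq (a b : List Int) (i n : Nat) (hi : i < n) :
    ∑ j ∈ Finset.range n, ∑ k ∈ Finset.range n, (if j ≠ i ∧ k ≠ i then sgn2 a b j k else 0)
      = TT a b n - (∑ k ∈ Finset.range n, sgn2 a b i k) - ∑ j ∈ Finset.range n, sgn2 a b j i := by
  have hperj : ∀ j ∈ Finset.range n,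
      ∑ k ∈ Finset.range n, (if j ≠ i ∧ k ≠ i then sgn2 a b j k else 0)
        = (∑ k ∈ Finset.range n, sgn2 a b j k) - sgn2 a b j i
          - (if j = i then ∑ k ∈ Finset.range n, sgn2 a b i k else 0)
          + (if j = i then sgn2 a b i i else 0) := by
    intro j _
    by_cases hj : j = i
    · subst hj
      simp
    · have hpt : ∀ k ∈ Finset.range n, (if j ≠ i ∧ k ≠ i then sgn2 a b j k else 0)
          = sgn2 a b j k - (if k = i then sgn2 a b j k else 0) := by
        intro k _
        by_cases hk : k = i <;> simp [hj, hk]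
      rw [Finset.sum_congr rfl hpt, Finset.sum_sub_distrib,
        Finset.sum_ite_eq' (Finset.range n) i]
      simp [hj, Finset.mem_range.mpr hi]
  rw [Finset.sum_congr rfl hperj]
  rw [Finset.sum_add_distrib, Finset.sum_sub_distrib, Finset.sum_sub_distrib]
  rw [Finset.sum_ite_eq' (Finset.range n) i, Finset.sum_ite_eq' (Finset.range n) i]
  have hd : sgn2 a b i i = 0 := by simp [sgn2]
  simp only [Finset.mem_range.mpr hi, if_pos, TT, hd, add_zero]
  ring

-- ===== VERDICT (by name: the statement is the Claim_ definition above) =====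
theorem crossProd_spec : Claim_equal_crossProd := by
  intro a b _ _
  unfold Spec_crossProd
  simp only [crossProd, crossProd_alt]
  rw [B_fold1, B_fold2, map_range_sum]
  refine List.map_congr_left fun i hi => ?_
  have hi' : i < a.length := List.mem_range.mp hi
  rw [A_elem, excl_eq a b i a.length hi', TT_eq_totB,
    row_eq a b i a.length hi', col_eq a b i a.length hi',
    list_sum_eq_prefL]
  simp only [prefL]
  ring
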